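-- pv_equiv track=rewrite | github.com/sgdd66/Optimization-under-Constraint | test.py | Pos2Index
-- ===== SOURCE A (Python) =====
-- def Pos2Index(pos,weight):
--     '''将坐标位置转换为索引号\n
--     input :\n
--     pos : 一维向量，坐标\n
--     weight : 维度权重\n
--
--     output :\n
--     index : 索引号'''
--
--     index = 0
--     dim = len(pos)
--     for i in range(dim):
--         value = 1
--         for j in range(i):
--             value *= weight[j]
--         index += value*pos[i]
--
--     return index
-- ===== SOURCE B (Python) =====
-- def Pos2Index(pos, weight):
--     index = 0
--     value = 1
--     for p, w in zip(pos, [1] + list(weight)):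
--         value *= w
--         index += value * p
--     return index
-- ===== Notes on version B (the rewrite author's own statement) =====
-- stated objective: faster
-- what changed: Replaces the nested loop that recomputes the prefix product of weights from scratch for every coordinate with a single pass that maintains a running cumulative product over zip(pos, [1]+weight).
import Mathlib
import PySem

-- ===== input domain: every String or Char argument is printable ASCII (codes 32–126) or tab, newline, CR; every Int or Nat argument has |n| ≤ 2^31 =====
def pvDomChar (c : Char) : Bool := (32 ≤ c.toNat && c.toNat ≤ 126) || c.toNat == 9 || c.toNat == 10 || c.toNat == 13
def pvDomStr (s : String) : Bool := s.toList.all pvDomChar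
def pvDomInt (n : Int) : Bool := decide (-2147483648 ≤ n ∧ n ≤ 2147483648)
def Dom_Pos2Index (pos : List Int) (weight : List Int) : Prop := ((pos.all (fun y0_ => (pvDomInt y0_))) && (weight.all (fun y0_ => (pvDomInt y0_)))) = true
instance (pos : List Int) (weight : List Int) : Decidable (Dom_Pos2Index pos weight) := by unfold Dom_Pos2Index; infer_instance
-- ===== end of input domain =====

-- B replaces A's quadratic recomputation of weight prefix products with a single
-- running-product pass (asymptotically faster; return value proved identical on Pre_).

-- ===== PORT A =====
-- literal port of A: outer loop over range(dim), inner loop recomputing the prefix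
-- product of weight; indices are in range under Pre_, so getD 0 is exact there.
def Pos2Index (pos : List Int) (weight : List Int) : Int :=
  let dim := pos.length
  (List.range dim).foldl
    (fun index i =>
      let value := (List.range i).foldl (fun value j => value * ((weight[j]?).getD 0)) 1
      index + value * ((pos[i]?).getD 0))
    0

-- ===== PORT B =====
-- literal port of Source B: single pass over zip(pos, [1] + weight), state (index, value)
def Pos2Index_alt (pos : List Int) (weight : List Int) : Int :=
  ((pos.zip (1 :: weight)).foldl
    (fun (s : Int × Int) pw =>
      let value := s.2 * pw.2
      (s.1 + value * pw.1, value))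
    ((0 : Int), (1 : Int))).1

-- ===== PRECONDITION & SPEC =====
-- Pre_ excludes exactly the inputs where Python A raises IndexError: the inner loop
-- reads weight[j] for j up to len(pos)-2, so weight must have at least len(pos)-1 entries.
def Pre_Pos2Index (pos : List Int) (weight : List Int) : Prop :=
  pos.length ≤ weight.length + 1
instance (pos : List Int) (weight : List Int) : Decidable (Pre_Pos2Index pos weight) := by
  unfold Pre_Pos2Index; infer_instance
def pvWitness_Pos2Index : List Int × List Int := ([2, 3], [5])

def Spec_Pos2Index (pos : List Int) (weight : List Int) (out : Int) : Prop := out = Pos2Index_alt pos weight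
instance (pos : List Int) (weight : List Int) (out : Int) : Decidable (Spec_Pos2Index pos weight out) := by unfold Spec_Pos2Index; infer_instance

-- ===== CLAIM (what is proved, stated in full; the proofs are below) =====
def Claim_equal_Pos2Index : Prop := ∀ (pos : List Int) (weight : List Int), Dom_Pos2Index pos weight → Pre_Pos2Index pos weight → Spec_Pos2Index pos weight (Pos2Index pos weight)

-- ===== LEMMAS AND PROOFS =====

-- A's result as a structural recursion: one coordinate plus the head weight times the rest.
def arec : List Int → List Int → Int
  | [], _ => 0
  | p :: _, [] => p
  | p :: ps, w :: ws => p + w * arec ps ws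

-- B's zip-fold as a structural recursion (value multiplied in before use).
def crec : List Int → List Int → Int
  | [], _ => 0
  | _ :: _, [] => 0
  | p :: ps, w :: ws => w * p + w * crec ps ws

theorem zipfold_eq_crec (ps ws : List Int) (i v : Int) :
    ((ps.zip ws).foldl
      (fun (s : Int × Int) pw =>
        let value := s.2 * pw.2
        (s.1 + value * pw.1, value)) (i, v)).1 = i + v * crec ps ws := by
  induction ps generalizing ws i v with
  | nil => simp [crec]
  | cons p ps ih =>
    cases ws with
    | nil => simp [crec]
    | cons w ws =>
      simp only [List.zip_cons_cons, List.foldl_cons, crec]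
      rw [ih]
      ring

theorem crec_nil (ps : List Int) : crec ps [] = 0 := by
  cases ps <;> simp [crec]

theorem crec_cons (ps : List Int) (w : Int) (ws : List Int) :
    crec ps (w :: ws) = w * arec ps ws := by
  induction ps generalizing w ws with
  | nil => simp [crec, arec]
  | cons p ps ih =>
    cases ws with
    | nil => simp [crec, arec, crec_nil]
    | cons u us => simp only [crec, arec, ih]; ring

theorem alt_eq_arec (pos weight : List Int) : Pos2Index_alt pos weight = arec pos weight := by
  unfold Pos2Index_alt
  rw [zipfold_eq_crec, crec_cons]
  ring

theorem foldl_add_shape (l : List Nat) (f : Nat → Int) (a : Int) :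
    l.foldl (fun s i => s + f i) a = a + (l.map f).sum := by
  induction l generalizing a with
  | nil => simp
  | cons x xs ih => simp [ih, add_assoc]

theorem foldl_mul_shape (l : List Nat) (f : Nat → Int) (a : Int) :
    l.foldl (fun s i => s * f i) a = a * (l.map f).prod := by
  induction l generalizing a with
  | nil => simp
  | cons x xs ih => simp [ih, mul_assoc]

-- the inner prefix product of A, shifted by one when a weight head is peeled off
theorem inner_shift (w : Int) (ws : List Int) (i : Nat) :
    (List.range (i + 1)).foldl (fun value j => value * (((w :: ws)[j]?).getD 0)) 1
      = w * (List.range i).foldl (fun value j => value * ((ws[j]?).getD 0)) 1 := by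
  rw [List.range_succ_eq_map]
  simp only [List.foldl_cons, List.foldl_map]
  rw [foldl_mul_shape, foldl_mul_shape]
  simp

theorem a_eq_arec (pos weight : List Int) : Pos2Index pos weight = arec pos weight := by
  induction pos generalizing weight with
  | nil => simp [Pos2Index, arec]
  | cons p ps ih =>
    have hA : Pos2Index (p :: ps) weight
        = (List.range (ps.length + 1)).foldl
            (fun index i =>
              index + ((List.range i).foldl (fun value j => value * ((weight[j]?).getD 0)) 1)
                * (((p :: ps)[i]?).getD 0)) 0 := rfl
    rw [hA, List.range_succ_eq_map, List.foldl_cons, List.foldl_map, foldl_add_shape]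
    cases weight with
    | nil =>
      have h0 : ∀ i : Nat,
          (List.range (i + 1)).foldl (fun value j => value * ((([] : List Int)[j]?).getD 0)) 1 = 0 := by
        intro i
        rw [List.range_succ_eq_map, List.foldl_cons]
        rw [List.foldl_map, foldl_mul_shape]
        simp
      have hmap : (List.range ps.length).map
            (fun y =>
              (List.range (y + 1)).foldl (fun value j => value * ((([] : List Int)[j]?).getD 0)) 1
                * (((p :: ps)[y + 1]?).getD 0))
          = (List.range ps.length).map (fun _ => (0 : Int)) := by
        apply List.map_congr_left
        intro i _
        rw [h0 i]
        ring
      rw [hmap]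
      simp [arec]
    | cons w ws =>
      have hmap : (List.range ps.length).map
            (fun y =>
              (List.range (y + 1)).foldl (fun value j => value * (((w :: ws)[j]?).getD 0)) 1
                * (((p :: ps)[y + 1]?).getD 0))
          = (List.range ps.length).map
            (fun i => w * ((List.range i).foldl (fun value j => value * ((ws[j]?).getD 0)) 1
                * ((ps[i]?).getD 0))) := by
        apply List.map_congr_left
        intro i _
        rw [inner_shift]
        simp [mul_assoc]
      rw [hmap, List.sum_map_mul_left]
      have ihs : (List.range ps.length).foldl
            (fun index i =>
              index + ((List.range i).foldl (fun value j => value * ((ws[j]?).getD 0)) 1)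
                * ((ps[i]?).getD 0)) 0 = arec ps ws := ih (weight := ws)
      rw [foldl_add_shape] at ihs
      simp only [zero_add] at ihs
      rw [ihs]
      simp [arec]

-- ===== VERDICT (by name: the statement is the Claim_ definition above) =====
theorem Pos2Index_spec : Claim_equal_Pos2Index := by
  intro pos weight _ _
  unfold Spec_Pos2Index
  rw [a_eq_arec, alt_eq_arec]
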